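-- pv_equiv track=rewrite | github.com/dillu9878/Codechef-Solutions | august_challenge/encoding.py | f
-- ===== SOURCE A (Python) =====
-- def f(x):
--     x3 = x
--     x = list(str(x))
--     x1 = [x[0]]
--     for i in range(1, len(x)):
--         if x[i] == x[i-1]:
--             x1.append('0')
--         else:
--             x1.append(x[i])
--     r = int(''.join(x1))
--     return r
-- ===== SOURCE B (Python) =====
-- def f(x):
--     s = str(x)
--     out = []
--     rest = s
--     while rest:
--         c = rest[0]
--         k = 1
--         while k < len(rest) and rest[k] == c:
--             k += 1
--         out.append(c + '0' * (k - 1))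
--         rest = rest[k:]
--     return int(''.join(out))
-- ===== Notes on version B (the rewrite author's own statement) =====
-- stated objective: alternative
-- what changed: B splits the decimal string into maximal runs of equal characters and emits each run's first character followed by zeros, instead of A's index loop comparing each character with its predecessor.
import Mathlib
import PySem

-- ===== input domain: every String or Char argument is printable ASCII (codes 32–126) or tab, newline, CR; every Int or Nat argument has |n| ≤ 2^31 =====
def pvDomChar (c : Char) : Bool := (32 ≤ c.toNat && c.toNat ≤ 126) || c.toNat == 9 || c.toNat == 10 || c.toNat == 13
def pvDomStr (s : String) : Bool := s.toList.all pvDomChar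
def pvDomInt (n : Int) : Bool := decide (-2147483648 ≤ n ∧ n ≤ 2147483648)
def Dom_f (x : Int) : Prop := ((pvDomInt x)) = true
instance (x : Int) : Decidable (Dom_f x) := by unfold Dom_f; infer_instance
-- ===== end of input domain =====

-- B re-implements the run replacement by maximal runs of equal characters instead of A's
-- predecessor-comparison index loop; same O(n) cost, structurally different traversal.

-- ===== PORT A =====
-- str(x) is never empty, so x[0] never raises; the pyGetD default ' ' is unreachable,
-- as is int() failing (the built string is always a valid integer literal).
def f (x : Int) : Int :=
  let s := PySem.Int.toChars x
  let x1 := (PySem.List.pyRange 1 s.length 1).foldl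
    (fun acc i =>
      if PySem.List.pyGetD s i ' ' = PySem.List.pyGetD s (i-1) ' '
      then acc ++ ['0']
      else acc ++ [PySem.List.pyGetD s i ' '])
    [PySem.List.pyGetD s 0 ' ']
  (PySem.Int.ofChars? x1).getD 0

-- ===== PORT B =====
-- the outer while loop of Source B: peel one maximal run (inner while = takeWhile) per step
def groupsEnc (l : List Char) : List Char :=
  match l with
  | [] => []
  | c :: rest =>
    (c :: List.replicate (rest.takeWhile (fun d => d = c)).length '0')
      ++ groupsEnc (rest.dropWhile (fun d => d = c))
termination_by l.length
decreasing_by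
  simp only [List.length_cons]
  exact Nat.lt_succ_of_le (List.length_dropWhile_le _ _)

def f_alt (x : Int) : Int :=
  (PySem.Int.ofChars? (groupsEnc (PySem.Int.toChars x))).getD 0

-- ===== PRECONDITION & SPEC =====
def Spec_f (x : Int) (out : Int) : Prop := out = f_alt x
instance (x : Int) (out : Int) : Decidable (Spec_f x out) := by unfold Spec_f; infer_instance

-- ===== CLAIM (what is proved, stated in full; the proofs are below) =====
def Claim_equal_f : Prop := ∀ (x : Int), Dom_f x → Spec_f x (f x)

-- ===== LEMMAS AND PROOFS =====

-- A's loop, characterised as structural recursion carrying the previous character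
def maskA (prev : Char) (l : List Char) : List Char :=
  match l with
  | [] => []
  | d :: ds => (if d = prev then '0' else d) :: maskA d ds

theorem loopA (s : List Char) (k : Nat) (h1 : 1 ≤ k) (h2 : k ≤ s.length) (acc : List Char) :
    (PySem.List.pyRange (k : Int) (s.length : Int) 1).foldl
      (fun acc i =>
        if PySem.List.pyGetD s i ' ' = PySem.List.pyGetD s (i-1) ' '
        then acc ++ ['0']
        else acc ++ [PySem.List.pyGetD s i ' ']) acc
      = acc ++ maskA (s.getD (k-1) ' ') (s.drop k) := by
  induction hn : s.length - k generalizing k acc with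
  | zero =>
      have hk : k = s.length := by omega
      subst hk
      rw [PySem.List.pyRange_one_eq_nil (le_refl _)]
      simp [maskA]
  | succ n ih =>
      have hk : k < s.length := by omega
      rw [PySem.List.pyRange_one_cons (by exact_mod_cast hk), List.foldl_cons]
      have e1 : PySem.List.pyGetD s (k : Int) ' ' = s[k] := by
        simp [PySem.List.pyGetD_natCast, List.getD_eq_getElem?_getD, hk]
      have ekm : ((k : Int) - 1) = ((k - 1 : Nat) : Int) := by omega
      have e2 : PySem.List.pyGetD s ((k : Int) - 1) ' ' = s.getD (k-1) ' ' := by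
        rw [ekm]; simp [PySem.List.pyGetD_natCast]
      have ek1 : ((k : Int) + 1) = ((k + 1 : Nat) : Int) := by omega
      rw [e1, e2, ek1, ih (k+1) (by omega) (by omega) _ (by omega)]
      have hdrop : s.drop k = s[k] :: s.drop (k+1) := List.drop_eq_getElem_cons hk
      have egd : s.getD k ' ' = s[k] := by
        simp [List.getD_eq_getElem?_getD, hk]
      rw [hdrop]
      simp only [Nat.add_sub_cancel, egd]
      by_cases hc : s[k] = s[k - 1]?.getD ' ' <;> simp [maskA, hc]

theorem maskA_run (c : Char) (t u : List Char) (ht : ∀ a ∈ t, a = c) :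
    maskA c (t ++ u) = List.replicate t.length '0' ++ maskA c u := by
  induction t with
  | nil => simp
  | cons a as ih =>
    have hac : a = c := ht a (by simp)
    simp [maskA, hac, List.replicate_succ, ih (fun b hb => ht b (by simp [hb]))]

theorem dropWhile_head_not (c d : Char) (ds : List Char) :
    ∀ (m : List Char), m.dropWhile (fun e => decide (e = c)) = d :: ds → ¬ d = c := by
  intro m
  induction m with
  | nil => intro h; simp at h
  | cons a as ihm =>
      intro h
      by_cases hac : a = c
      · rw [List.dropWhile_cons_of_pos (by simp [hac])] at h
        exact ihm h
      · rw [List.dropWhile_cons_of_neg (by simp [hac])] at h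
        injection h with h1 _
        subst h1
        exact hac

theorem maskA_eq_groupsEnc (l : List Char) (c : Char) :
    c :: maskA c l = groupsEnc (c :: l) := by
  induction hn : l.length using Nat.strong_induction_on generalizing l c with
  | _ n ih =>
  rw [groupsEnc]
  have hsplit : l = l.takeWhile (fun d => d = c) ++ l.dropWhile (fun d => d = c) :=
    (List.takeWhile_append_dropWhile).symm
  have ht : ∀ a ∈ l.takeWhile (fun d => d = c), a = c := by
    intro a ha
    have := List.mem_takeWhile_imp ha
    simpa using this
  conv_lhs => rw [hsplit]
  rw [maskA_run c _ _ ht]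
  cases hu : l.dropWhile (fun d => d = c) with
  | nil => simp [maskA, groupsEnc]
  | cons d ds =>
      have hdc : ¬ (d = c) := dropWhile_head_not c d ds l hu
      have hlen : ds.length < n := by
        have h1 := List.length_dropWhile_le (fun d => decide (d = c)) l
        rw [hu] at h1
        simp at h1
        omega
      simp only [maskA]
      rw [if_neg hdc, ih ds.length hlen ds d rfl]
      simp

theorem f_eq (x : Int) : f x = f_alt x := by
  cases hs : PySem.Int.toChars x with
  | nil =>
      simp only [f, f_alt, hs]
      have hg : groupsEnc [] = [] := by simp [groupsEnc]
      rw [hg, PySem.List.pyRange_one_eq_nil (by simp)]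
      decide
  | cons c rest =>
      simp only [f, f_alt, hs]
      have L := loopA (c :: rest) 1 le_rfl (by simp) [PySem.List.pyGetD (c :: rest) 0 ' ']
      simp only [Nat.cast_one, Nat.sub_self] at L
      rw [L]
      simp [PySem.List.pyGetD_zero_cons, maskA_eq_groupsEnc]

-- ===== VERDICT (by name: the statement is the Claim_ definition above) =====
theorem f_spec : Claim_equal_f := by
  intro x _
  unfold Spec_f
  exact f_eq x
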